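-- pv_equiv track=rewrite | github.com/wjsgus95/Samsung-SW-Test-Practice | 2d_array_ops.py | op
-- ===== SOURCE A (Python) =====
-- def op(line):
--     new_line = []
--     count = {}
--
--     for n in line:
--         count[n] = count.get(n, 0) + 1
--
--     for n in count:
--         new_line.append((n, count[n]))
--
--     new_line.sort(key=lambda v: (v[1], v[0]))
--     result = []
--     for number, count in new_line:
--         result.append(number)
--         result.append(count)
--     return result
-- ===== SOURCE B (Python) =====
-- def op(line):
--     ys = sorted(line)
--     pairs = []
--     i = 0
--     while i < len(ys):
--         j = i + 1
--         while j < len(ys) and ys[j] == ys[i]: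
--             j += 1
--         pairs.append((ys[i], j - i))
--         i = j
--     pairs.sort(key=lambda p: (p[1], p[0]))
--     return [x for p in pairs for x in p]
-- ===== Notes on version B (the rewrite author's own statement) =====
-- stated objective: alternative
-- what changed: Replaces the hash-dict frequency count with sort-then-scan run-length grouping (sorted copy, one linear walk over equal runs), keeping the final (count,value) sort and flattening.
import Mathlib
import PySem

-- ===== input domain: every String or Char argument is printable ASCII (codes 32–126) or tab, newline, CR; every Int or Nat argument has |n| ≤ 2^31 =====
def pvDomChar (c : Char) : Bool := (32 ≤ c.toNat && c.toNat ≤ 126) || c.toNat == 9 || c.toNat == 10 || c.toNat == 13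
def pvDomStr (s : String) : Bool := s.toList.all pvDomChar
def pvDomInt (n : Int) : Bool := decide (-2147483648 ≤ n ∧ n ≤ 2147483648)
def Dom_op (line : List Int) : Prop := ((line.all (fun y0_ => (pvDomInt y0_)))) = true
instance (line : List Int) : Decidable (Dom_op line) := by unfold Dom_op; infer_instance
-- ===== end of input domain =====

-- B replaces A's hash-dict counting with sort-then-scan run-length grouping; same final (count,value) sort and flattening (objective: alternative).

-- ===== PORT A =====
def op (line : List Int) : List Int :=
  let count := line.foldl (fun d n => d.insert n (d.getD n 0 + 1)) (PySem.Dict.empty : PySem.Dict Int Int)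
  let new_line := count.keys.foldl (fun acc n => acc ++ [(n, count.getD n 0)]) []
  let new_line2 := PySem.List.sorted2 new_line (fun v => v.2) (fun v => v.1)
  new_line2.foldl (fun r p => r ++ [p.1, p.2]) []

-- ===== PORT B =====
-- the two nested `while` loops of Source B: one run (takeWhile) per step, then skip it (dropWhile)
def opRuns : List Int → List (Int × Int)
  | [] => []
  | x :: t => (x, ((t.takeWhile (· == x)).length + 1 : Int)) :: opRuns (t.dropWhile (· == x))
termination_by ys => ys.length
decreasing_by
  simp only [List.length_cons]
  exact Nat.lt_succ_of_le (t.dropWhile_sublist (p := (· == x))).length_le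

def op_alt (line : List Int) : List Int :=
  let ys := PySem.List.sorted line (fun x => x)
  let pairs := PySem.List.sorted2 (opRuns ys) (fun p => p.2) (fun p => p.1)
  pairs.flatMap (fun p => [p.1, p.2])

-- ===== PRECONDITION & SPEC =====
def Spec_op (line : List Int) (out : List Int) : Prop := out = op_alt line
instance (line : List Int) (out : List Int) : Decidable (Spec_op line out) := by unfold Spec_op; infer_instance

-- ===== CLAIM (what is proved, stated in full; the proofs are below) =====
def Claim_equal_op : Prop := ∀ (line : List Int), Dom_op line → Spec_op line (op line)

-- ===== LEMMAS AND PROOFS =====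
theorem sorted2_eq_sorted_lex {α κ₁ κ₂ : Type} [LinearOrder κ₁] [LinearOrder κ₂]
    (xs : List α) (k1 : α → κ₁) (k2 : α → κ₂) :
    PySem.List.sorted2 xs k1 k2 = PySem.List.sorted xs (fun a => toLex (k1 a, k2 a)) := by
  have hfn : (fun (a b : α) => decide (k1 a < k1 b) || (!decide (k1 b < k1 a) && decide (k2 a < k2 b)))
      = fun (a b : α) => decide (toLex (k1 a, k2 a) < toLex (k1 b, k2 b)) := by
    funext a b
    rcases lt_trichotomy (k1 a) (k1 b) with h|h|h
    · simp [Prod.Lex.lt_iff, h]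
    · simp [Prod.Lex.lt_iff, h]
    · simp [Prod.Lex.lt_iff, lt_asymm h, h.ne']
      exact fun hle => absurd hle (not_le.mpr h)
  rw [PySem.List.sorted_eq_foldl_insertBy]
  simp only [PySem.List.sorted2, hfn, if_neg (Bool.false_ne_true)]

theorem not_mem_dropWhile (x : Int) (t : List Int) (h : (x :: t).Pairwise (· ≤ ·)) :
    x ∉ t.dropWhile (· == x) := by
  induction t with
  | nil => simp
  | cons a t ih =>
    rcases List.pairwise_cons.mp h with ⟨hx, ht⟩
    rcases List.pairwise_cons.mp ht with ⟨ha, ht'⟩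
    by_cases hax : a = x
    · subst hax
      rw [List.dropWhile_cons_of_pos (by simp)]
      exact ih (List.pairwise_cons.mpr ⟨fun y hy => hx y (List.mem_cons_of_mem _ hy), ht'⟩)
    · rw [List.dropWhile_cons_of_neg (by simp [hax])]
      intro hm
      rcases List.mem_cons.mp hm with h1 | h2
      · exact hax h1.symm
      · exact hax (le_antisymm (ha x h2) (hx a List.mem_cons_self))

theorem mem_opRuns (ys : List Int) (h : ys.Pairwise (· ≤ ·)) (p : Int × Int) :
    p ∈ opRuns ys ↔ ∃ k ∈ ys, p = (k, (ys.count k : Int)) := by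
  induction ys using opRuns.induct with
  | case1 => simp [opRuns]
  | case2 x t ih =>
    have htw := List.takeWhile_append_dropWhile (p := (· == x)) (l := t)
    have hnd := not_mem_dropWhile x t h
    have hdw : (t.dropWhile (· == x)).Pairwise (· ≤ ·) :=
      List.Pairwise.sublist (List.dropWhile_sublist _) (List.pairwise_cons.mp h).2
    have hcx : (x :: t).count x = (t.takeWhile (· == x)).length + 1 := by
      have h1 : (t.takeWhile (· == x)).count x = (t.takeWhile (· == x)).length := by
        rw [List.count_eq_length]
        intro b hb
        have hb' := List.mem_takeWhile_imp hb
        exact (show b = x by simpa using hb').symm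
      have h2 : (t.dropWhile (· == x)).count x = 0 := List.count_eq_zero.mpr hnd
      have h3 : t.count x = (t.takeWhile (· == x)).length := by
        conv_lhs => rw [← htw]
        rw [List.count_append, h1, h2]
        omega
      simp [List.count_cons_self, h3]
    have hck : ∀ k ∈ t.dropWhile (· == x), (x :: t).count k = (t.dropWhile (· == x)).count k := by
      intro k hk
      have hkx : k ≠ x := fun he => hnd (he ▸ hk)
      have h1 : (t.takeWhile (· == x)).count k = 0 := by
        rw [List.count_eq_zero]
        intro hm
        exact hkx (by simpa using List.mem_takeWhile_imp hm)
      have h3 : t.count k = (t.dropWhile (· == x)).count k := by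
        conv_lhs => rw [← htw]
        rw [List.count_append, h1, Nat.zero_add]
      rw [← h3, List.count_cons, if_neg (by simpa using hkx.symm)]
      omega
    rw [opRuns]
    constructor
    · intro hm
      rcases List.mem_cons.mp hm with h1 | h2
      · refine ⟨x, List.mem_cons_self, ?_⟩
        rw [h1, hcx]
        push_cast
        ring_nf
      · rcases (ih hdw).mp h2 with ⟨k, hk, hpk⟩
        refine ⟨k, List.mem_cons_of_mem _ ((List.dropWhile_sublist _).mem hk), ?_⟩
        rw [hpk, hck k hk]
    · rintro ⟨k, hk, hpk⟩
      rcases List.mem_cons.mp hk with h1 | h2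
      · subst h1
        refine List.mem_cons.mpr (Or.inl ?_)
        rw [hpk, hcx]
        push_cast
        ring_nf
      · rcases (List.mem_append.mp (htw ▸ h2)) with h3 | h3
        · have hkx : k = x := by simpa using List.mem_takeWhile_imp h3
          subst hkx
          refine List.mem_cons.mpr (Or.inl ?_)
          rw [hpk, hcx]
          push_cast
          ring_nf
        · refine List.mem_cons.mpr (Or.inr ((ih hdw).mpr ⟨k, h3, ?_⟩))
          rw [hpk, hck k h3]

theorem nodup_opRuns (ys : List Int) (h : ys.Pairwise (· ≤ ·)) :
    (opRuns ys).Nodup := by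
  induction ys using opRuns.induct with
  | case1 => simp [opRuns]
  | case2 x t ih =>
    have hnd := not_mem_dropWhile x t h
    have hdw : (t.dropWhile (· == x)).Pairwise (· ≤ ·) :=
      List.Pairwise.sublist (List.dropWhile_sublist _) (List.pairwise_cons.mp h).2
    rw [opRuns, List.nodup_cons]
    refine ⟨?_, ih hdw⟩
    intro hm
    rcases (mem_opRuns _ hdw _).mp hm with ⟨k, hk, hpk⟩
    have hkx : x = k := congrArg Prod.fst hpk
    exact hnd (hkx ▸ hk)

theorem opRuns_perm (line : List Int) :
    (opRuns (PySem.List.sorted line (fun x => x))).Perm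
      ((PySem.Set.ofList line : List Int).map (fun k => (k, (line.count k : Int)))) := by
  have hs : (PySem.List.sorted line (fun x => x)).Pairwise (· ≤ ·) :=
    PySem.List.sorted_pairwise line (fun x => x)
  have hperm := PySem.List.sorted_perm line (fun x => x) false
  have hinj : Function.Injective (fun k : Int => (k, (line.count k : Int))) := by
    intro a b hab
    simpa using congrArg Prod.fst hab
  rw [List.perm_ext_iff_of_nodup (nodup_opRuns _ hs) ((PySem.Set.nodup_ofList line).map hinj)]
  intro p
  rw [mem_opRuns _ hs p, List.mem_map]
  constructor
  · rintro ⟨k, hk, hpk⟩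
    refine ⟨k, (PySem.Set.mem_ofList line k).mpr (hperm.mem_iff.mp hk), ?_⟩
    rw [hpk, hperm.count_eq]
  · rintro ⟨k, hk, hpk⟩
    refine ⟨k, hperm.mem_iff.mpr ((PySem.Set.mem_ofList line k).mp hk), ?_⟩
    rw [← hpk, hperm.count_eq]

theorem foldl_append_fn {α β : Type} (f : α → List β) (l : List α) (init : List β) :
    l.foldl (fun acc x => acc ++ f x) init = init ++ l.flatMap f := by
  induction l generalizing init with
  | nil => simp
  | cons a l ih => simp [List.foldl_cons, ih, List.flatMap_cons, List.append_assoc]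

theorem flatMap_single_eq_map {α β : Type} (g : α → β) (l : List α) :
    l.flatMap (fun x => [g x]) = l.map g := by
  induction l with
  | nil => rfl
  | cons a l ih => simp [List.flatMap_cons, ih]

theorem op_eq (line : List Int) : op line = op_alt line := by
  simp only [op, op_alt]
  rw [PySem.Dict.foldl_insert_getD_add_one_eq_counter]
  rw [foldl_append_fn (fun n => [(n, (PySem.Dict.counter line).getD n 0)]), List.nil_append,
    flatMap_single_eq_map]
  rw [PySem.Dict.keys_counter]
  simp only [PySem.Dict.getD_counter]
  rw [foldl_append_fn (fun p : Int × Int => [p.1, p.2]), List.nil_append]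
  rw [sorted2_eq_sorted_lex, sorted2_eq_sorted_lex]
  congr 1
  refine PySem.List.sorted_eq_sorted_of_perm _ _ _ ?_ (opRuns_perm line).symm
  intro a b hab
  have h' : (a.2, a.1) = (b.2, b.1) := toLex.injective hab
  exact Prod.ext (congrArg Prod.snd h') (congrArg Prod.fst h')

-- ===== VERDICT (by name: the statement is the Claim_ definition above) =====
theorem op_spec : Claim_equal_op := by
  intro line _
  unfold Spec_op
  exact op_eq line
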